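-- pv_equiv track=rewrite | github.com/wtalioy/ChainBench | scripts/eval/metrics/delivery.py | is_single_insertion_or_deletion
-- ===== SOURCE A (Python) =====
-- def is_single_insertion_or_deletion(tokens_a: list[str], tokens_b: list[str]) -> bool:
--     if abs(len(tokens_a) - len(tokens_b)) != 1:
--         return False
--     shorter, longer = (tokens_a, tokens_b) if len(tokens_a) < len(tokens_b) else (tokens_b, tokens_a)
--     mismatch_seen = False
--     short_index = 0
--     long_index = 0
--     while short_index < len(shorter) and long_index < len(longer):
--         if shorter[short_index] == longer[long_index]:
--             short_index += 1
--             long_index += 1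
--             continue
--         if mismatch_seen:
--             return False
--         mismatch_seen = True
--         long_index += 1
--     return True
-- ===== SOURCE B (Python) =====
-- def is_single_insertion_or_deletion(tokens_a: list[str], tokens_b: list[str]) -> bool:
--     if abs(len(tokens_a) - len(tokens_b)) != 1:
--         return False
--     shorter, longer = (tokens_a, tokens_b) if len(tokens_a) < len(tokens_b) else (tokens_b, tokens_a)
--
--     def common_prefix_len(xs, ys):
--         k = 0
--         while k < len(xs) and k < len(ys) and xs[k] == ys[k]:
--             k += 1
--         return k
--
--     p = common_prefix_len(shorter, longer)
--     q = common_prefix_len(shorter[::-1], longer[::-1])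
--     return p + q >= len(shorter)
-- ===== Notes on version B (the rewrite author's own statement) =====
-- stated objective: alternative
-- what changed: Replaces A's merged two-pointer/mismatch-flag scan with two independent scans: the common-prefix length p and (on the reversed lists) the common-suffix length q, returning p + q >= len(shorter).
import Mathlib
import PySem

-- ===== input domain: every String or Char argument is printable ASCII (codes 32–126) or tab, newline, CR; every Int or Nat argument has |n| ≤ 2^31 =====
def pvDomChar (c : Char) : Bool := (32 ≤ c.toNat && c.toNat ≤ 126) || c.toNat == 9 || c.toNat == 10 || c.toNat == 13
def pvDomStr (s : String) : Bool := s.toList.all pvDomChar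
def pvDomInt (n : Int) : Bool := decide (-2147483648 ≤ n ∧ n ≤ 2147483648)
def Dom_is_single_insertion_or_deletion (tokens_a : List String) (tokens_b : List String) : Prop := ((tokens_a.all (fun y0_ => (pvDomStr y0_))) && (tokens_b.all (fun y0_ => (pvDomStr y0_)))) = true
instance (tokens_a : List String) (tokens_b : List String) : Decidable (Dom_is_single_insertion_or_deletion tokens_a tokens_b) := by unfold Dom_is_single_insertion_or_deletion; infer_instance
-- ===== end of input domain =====

-- B replaces A's merged two-pointer/mismatch-flag scan with two independent scans
-- (common-prefix length and, on the reversed lists, common-suffix length) and the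
-- arithmetic test p + q ≥ len(shorter); same cost, a different algorithm.

-- ===== PORT A =====
-- A's while loop over (short_index, long_index, mismatch_seen): recursion over the
-- suffixes of shorter/longer carrying the mismatch flag; loop exits true when
-- either list is exhausted.
def pvLoopA : List String → List String → Bool → Bool
  | s :: ss, l :: ls, m =>
    if s = l then pvLoopA ss ls m
    else if m then false
    else pvLoopA (s :: ss) ls true
  | _, _, _ => true
termination_by _ l _ => l.length
decreasing_by all_goals simp

def is_single_insertion_or_deletion (tokens_a : List String) (tokens_b : List String) : Bool :=
  if ((tokens_a.length : Int) - tokens_b.length).natAbs ≠ 1 then false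
  else
    let p := if tokens_a.length < tokens_b.length then (tokens_a, tokens_b) else (tokens_b, tokens_a)
    pvLoopA p.1 p.2 false

-- ===== PORT B =====
-- Source B's common_prefix_len while loop: k advances while both lists have an
-- element at k and they agree — structurally, count the agreeing heads.
def pvCPL : List String → List String → Nat
  | x :: xs, y :: ys => if x = y then pvCPL xs ys + 1 else 0
  | _, _ => 0

-- xs[::-1] is List.reverse (exact: a full step -1 slice reverses the list).
def is_single_insertion_or_deletion_alt (tokens_a : List String) (tokens_b : List String) : Bool :=
  if ((tokens_a.length : Int) - tokens_b.length).natAbs ≠ 1 then false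
  else
    let pr := if tokens_a.length < tokens_b.length then (tokens_a, tokens_b) else (tokens_b, tokens_a)
    let p := pvCPL pr.1 pr.2
    let q := pvCPL pr.1.reverse pr.2.reverse
    decide (pr.1.length ≤ p + q)

-- ===== PRECONDITION & SPEC =====
def Spec_is_single_insertion_or_deletion (tokens_a : List String) (tokens_b : List String) (out : Bool) : Prop := out = is_single_insertion_or_deletion_alt tokens_a tokens_b
instance (tokens_a : List String) (tokens_b : List String) (out : Bool) : Decidable (Spec_is_single_insertion_or_deletion tokens_a tokens_b out) := by unfold Spec_is_single_insertion_or_deletion; infer_instance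

-- ===== CLAIM (what is proved, stated in full; the proofs are below) =====
def Claim_equal_is_single_insertion_or_deletion : Prop := ∀ (tokens_a : List String) (tokens_b : List String), Dom_is_single_insertion_or_deletion tokens_a tokens_b → Spec_is_single_insertion_or_deletion tokens_a tokens_b (is_single_insertion_or_deletion tokens_a tokens_b)

-- ===== LEMMAS AND PROOFS =====

-- After the (single allowed) mismatch, A's loop only advances in lockstep and
-- fails on any further mismatch: with equal remaining lengths it decides equality.
theorem pvLoopA_true_eq (s l : List String) (h : l.length = s.length) :
    pvLoopA s l true = decide (s = l) := by
  induction s generalizing l with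
  | nil =>
    cases l with
    | nil => simp [pvLoopA]
    | cons y ls => simp at h
  | cons x ss ih =>
    cases l with
    | nil => simp at h
    | cons y ls =>
      simp at h
      by_cases hxy : x = y
      · simp [pvLoopA, hxy, ih ls h]
      · simp [pvLoopA, hxy]

-- With longer exactly one element longer, A's fresh loop run decides
-- "drop the common prefix of shorter; drop one more from longer; tails equal".
theorem pvLoopA_false_eq (s l : List String) (h : l.length = s.length + 1) :
    pvLoopA s l false = decide (s.drop (pvCPL s l) = l.drop (pvCPL s l + 1)) := by
  induction s generalizing l with
  | nil =>
    cases l with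
    | nil => simp at h
    | cons y ls =>
      simp at h
      simp [pvLoopA, pvCPL, h]
  | cons x ss ih =>
    cases l with
    | nil => simp at h
    | cons y ls =>
      simp at h
      by_cases hxy : x = y
      · simpa [pvLoopA, hxy, pvCPL] using ih ls h
      · simp [pvLoopA, hxy, pvCPL, List.drop]
        exact pvLoopA_true_eq (x :: ss) ls (by simp [h])

-- pvCPL is bounded by both lengths.
theorem pvCPL_le_left (s l : List String) : pvCPL s l ≤ s.length := by
  induction s generalizing l with
  | nil => simp [pvCPL]
  | cons x ss ih =>
    cases l with
    | nil => simp [pvCPL]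
    | cons y ls =>
      by_cases hxy : x = y
      · simpa [pvCPL, hxy] using ih ls
      · simp [pvCPL, hxy]

-- The takes of length pvCPL agree (pvCPL is a common prefix length).
theorem pvCPL_take (s l : List String) : s.take (pvCPL s l) = l.take (pvCPL s l) := by
  induction s generalizing l with
  | nil => simp [pvCPL]
  | cons x ss ih =>
    cases l with
    | nil => simp [pvCPL]
    | cons y ls =>
      by_cases hxy : x = y
      · simp [pvCPL, hxy, ih ls]
      · simp [pvCPL, hxy]

-- pvCPL is maximal: any agreeing take length is ≤ pvCPL.
theorem le_pvCPL_of_take_eq (s l : List String) (k : Nat)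
    (hk : k ≤ s.length) (hk' : k ≤ l.length) (h : s.take k = l.take k) :
    k ≤ pvCPL s l := by
  induction s generalizing l k with
  | nil => simp at hk; omega
  | cons x ss ih =>
    cases l with
    | nil => simp at hk'; omega
    | cons y ls =>
      cases k with
      | zero => exact Nat.zero_le _
      | succ k =>
        simp [List.take] at h hk hk'
        obtain ⟨hxy, ht⟩ := h
        simp [pvCPL, hxy]
        exact ih ls k hk hk' ht

-- The bridge: with |l| = |s|+1, "tails after (p, p+1) equal" ⟺ p + q ≥ |s|,
-- where p is the common-prefix length and q the common-suffix length.
theorem drop_eq_iff_pfx_sfx (s l : List String) (h : l.length = s.length + 1) :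
    (s.drop (pvCPL s l) = l.drop (pvCPL s l + 1)) ↔
      s.length ≤ pvCPL s l + pvCPL s.reverse l.reverse := by
  set p := pvCPL s l with hp
  set q := pvCPL s.reverse l.reverse with hq
  have hps : p ≤ s.length := pvCPL_le_left s l
  have h1 : (s.drop p).reverse = s.reverse.take (s.length - p) := List.reverse_drop
  have h2 : (l.drop (p + 1)).reverse = l.reverse.take (s.length - p) := by
    have : l.length - (p + 1) = s.length - p := by omega
    simpa [this] using (List.reverse_drop (l := l) (i := p + 1))
  constructor
  · intro hd
    have hrev : s.reverse.take (s.length - p) = l.reverse.take (s.length - p) := by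
      rw [← h1, ← h2, hd]
    have := le_pvCPL_of_take_eq s.reverse l.reverse (s.length - p)
      (by simp) (by simp; omega) hrev
    omega
  · intro hle
    have htq : s.reverse.take q = l.reverse.take q := pvCPL_take _ _
    have hrev : s.reverse.take (s.length - p) = l.reverse.take (s.length - p) := by
      have := congrArg (List.take (s.length - p)) htq
      simpa [List.take_take, Nat.min_eq_left (show s.length - p ≤ q by omega)] using this
    have : (s.drop p).reverse = (l.drop (p + 1)).reverse := by rw [h1, h2, hrev]
    exact List.reverse_inj.mp this

-- ===== VERDICT (by name: the statement is the Claim_ definition above) =====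
theorem is_single_insertion_or_deletion_spec : Claim_equal_is_single_insertion_or_deletion := by
  intro a b _dom
  unfold Spec_is_single_insertion_or_deletion is_single_insertion_or_deletion is_single_insertion_or_deletion_alt
  by_cases hg : ((a.length : Int) - b.length).natAbs ≠ 1
  · simp [hg]
  · simp only [hg, if_false]
    by_cases hlt : a.length < b.length
    · simp only [hlt, if_true]
      rw [pvLoopA_false_eq a b (by omega)]
      simp [drop_eq_iff_pfx_sfx a b (by omega)]
    · simp only [hlt, if_false]
      rw [pvLoopA_false_eq b a (by omega)]
      simp [drop_eq_iff_pfx_sfx b a (by omega)]
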